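-- pv_equiv track=rewrite | github.com/EML4U/Drift-detector-comparison | evaluation/results_reader.py | get_result_ids
-- ===== SOURCE A (Python) =====
-- def get_result_ids(results, ids=[], modes=[], detectors=[], keys=[]):
--     ids_ = set()
--     modes_ = set()
--     detectors_ = set()
--     keys_ = set()
--     for id_ in ids if ids else results:
--         data = results[id_]["data"]
--         for mode in modes if modes else data:
--             for detector in detectors if detectors else data[mode]:
--                 for key in keys if keys else data[mode][detector]:
--                     if key in data[mode][detector] and data[mode][detector][key]:
--                         ids_.add(id_)
--                         modes_.add(mode)
--                         detectors_.add(detector)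
--                         keys_.add(key)
--     return sorted(ids_), sorted(modes_), sorted(detectors_), sorted(keys_)
-- ===== SOURCE B (Python) =====
-- def get_result_ids(results, ids=[], modes=[], detectors=[], keys=[]):
--     # Generic recursive descent over the filter levels: one helper handles every
--     # dict level uniformly (iterate the filter if given, else the dict), returning
--     # flat hit tuples; the four outputs are projections (zip) of that one list.
--     def rec(node, filters):
--         it = filters[0] if filters[0] else node
--         if len(filters) == 1:
--             return [(k,) for k in it if k in node and node[k]]
--         return [(k,) + t for k in it for t in rec(node[k], filters[1:])]
--
--     tuples = [(i,) + t
--               for i in (ids if ids else results)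
--               for t in rec(results[i]["data"], [modes, detectors, keys])]
--     cols = list(zip(*tuples)) or [(), (), (), ()]
--     return tuple(sorted(set(c)) for c in cols)
-- ===== Notes on version B (the rewrite author's own statement) =====
-- stated objective: alternative
-- what changed: A hand-writes four nested loops that co-maintain four set accumulators; B replaces them by one generic recursive descent (a single helper applied uniformly to every dict level, taking the remaining filter lists as an argument) that returns one flat list of hit tuples, from which the four sorted outputs are obtained by transposing (zip) and projecting.
import Mathlib
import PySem

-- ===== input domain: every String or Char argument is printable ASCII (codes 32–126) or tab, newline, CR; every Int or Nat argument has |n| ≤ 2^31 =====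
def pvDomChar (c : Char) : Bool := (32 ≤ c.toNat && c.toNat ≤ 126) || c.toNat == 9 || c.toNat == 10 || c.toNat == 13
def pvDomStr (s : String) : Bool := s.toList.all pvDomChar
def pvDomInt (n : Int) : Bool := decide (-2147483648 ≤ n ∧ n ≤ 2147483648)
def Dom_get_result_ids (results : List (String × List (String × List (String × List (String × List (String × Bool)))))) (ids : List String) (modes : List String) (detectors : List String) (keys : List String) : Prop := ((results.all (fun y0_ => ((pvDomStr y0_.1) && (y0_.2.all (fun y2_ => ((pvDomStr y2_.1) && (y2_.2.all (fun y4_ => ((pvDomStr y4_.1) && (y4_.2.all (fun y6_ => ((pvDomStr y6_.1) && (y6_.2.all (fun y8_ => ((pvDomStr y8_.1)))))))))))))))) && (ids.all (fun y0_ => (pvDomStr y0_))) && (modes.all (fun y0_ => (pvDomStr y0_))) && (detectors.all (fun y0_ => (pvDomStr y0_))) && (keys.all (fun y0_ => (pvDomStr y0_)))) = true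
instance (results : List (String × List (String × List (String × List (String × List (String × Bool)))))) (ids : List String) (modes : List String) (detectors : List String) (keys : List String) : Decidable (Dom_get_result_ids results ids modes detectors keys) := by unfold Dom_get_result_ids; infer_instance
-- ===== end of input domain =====

-- A hand-writes four nested loops co-maintaining four set accumulators; B is a generic
-- recursive descent (one helper per dict level, Python's single untyped recursive helper
-- type-specialised) collecting one flat list of hit tuples, projected into the four sorted
-- outputs (objective: alternative decomposition, same traversal cost).

-- dict lookup d[k] with a default (Python raises KeyError where the key is absent — those
-- inputs are excluded by Pre_get_result_ids below, where the default is never taken)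
def pvGetD {α : Type} (d : List (String × α)) (k : String) (dflt : α) : α :=
  PySem.Dict.getD (PySem.Dict.mk d) k dflt

-- 'k in d' for a dict
def pvHas {α : Type} (d : List (String × α)) (k : String) : Bool :=
  PySem.Dict.contains (PySem.Dict.mk d) k

-- A's loop body as a helper: add the four components of one hit to the four accumulator sets
def pvStep4 (st : PySem.Set String × PySem.Set String × PySem.Set String × PySem.Set String)
    (h : String × String × String × String) :
    PySem.Set String × PySem.Set String × PySem.Set String × PySem.Set String :=
  (PySem.Set.add st.1 h.1, PySem.Set.add st.2.1 h.2.1,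
   PySem.Set.add st.2.2.1 h.2.2.1, PySem.Set.add st.2.2.2 h.2.2.2)

-- ===== PORT A =====
def get_result_ids (results : List (String × List (String × List (String × List (String × List (String × Bool)))))) (ids : List String) (modes : List String) (detectors : List String) (keys : List String) : List String × List String × List String × List String :=
  let st := (if ids.isEmpty then results.map (·.1) else ids).foldl
    (fun st id_ =>
      let data := pvGetD (pvGetD results id_ []) "data" []
      (if modes.isEmpty then data.map (·.1) else modes).foldl
        (fun st mode =>
          let dmode := pvGetD data mode []
          (if detectors.isEmpty then dmode.map (·.1) else detectors).foldl
            (fun st detector =>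
              let dd := pvGetD dmode detector []
              (if keys.isEmpty then dd.map (·.1) else keys).foldl
                (fun st key =>
                  if pvHas dd key && pvGetD dd key false then
                    pvStep4 st (id_, mode, detector, key)
                  else st)
                st)
            st)
        st)
    (PySem.Set.empty, PySem.Set.empty, PySem.Set.empty, PySem.Set.empty)
  (PySem.List.sorted st.1 (fun x => x) false, PySem.List.sorted st.2.1 (fun x => x) false,
   PySem.List.sorted st.2.2.1 (fun x => x) false, PySem.List.sorted st.2.2.2 (fun x => x) false)

-- ===== PORT B =====
-- Python B's recursive helper 'rec' is untyped and recurses over the list of remaining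
-- filters; in Lean it is ported step for step as one function per level (pvRec1/2/3),
-- exact because each Python call site fixes the level.
def pvRec1 (node : List (String × Bool)) (f1 : List String) : List String :=
  (if f1.isEmpty then node.map (·.1) else f1).filter
    (fun k => pvHas node k && pvGetD node k false)

def pvRec2 (node : List (String × List (String × Bool))) (f2 f1 : List String) :
    List (String × String) :=
  (if f2.isEmpty then node.map (·.1) else f2).flatMap
    (fun k => (pvRec1 (pvGetD node k []) f1).map (fun t => (k, t)))

def pvRec3 (node : List (String × List (String × List (String × Bool)))) (f3 f2 f1 : List String) :
    List (String × String × String) :=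
  (if f3.isEmpty then node.map (·.1) else f3).flatMap
    (fun k => (pvRec2 (pvGetD node k []) f2 f1).map (fun t => (k, t)))

-- 'list(zip(*tuples)) or [(),(),(),()]' then sorted(set(c)) per column is ported as the four
-- column projections (exact: zip(*) of quadruples yields exactly the four columns, and the
-- 'or' fallback is the empty-list case of the if)
def get_result_ids_alt (results : List (String × List (String × List (String × List (String × List (String × Bool)))))) (ids : List String) (modes : List String) (detectors : List String) (keys : List String) : List String × List String × List String × List String :=
  let tuples : List (String × String × String × String) :=
    (if ids.isEmpty then results.map (·.1) else ids).flatMap (fun i =>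
      (pvRec3 (pvGetD (pvGetD results i []) "data" []) modes detectors keys).map
        (fun t => (i, t)))
  if tuples.isEmpty then ([], [], [], [])
  else
    (PySem.List.sorted (PySem.Set.ofList (tuples.map (·.1))) (fun x => x) false,
     PySem.List.sorted (PySem.Set.ofList (tuples.map (·.2.1))) (fun x => x) false,
     PySem.List.sorted (PySem.Set.ofList (tuples.map (·.2.2.1))) (fun x => x) false,
     PySem.List.sorted (PySem.Set.ofList (tuples.map (·.2.2.2))) (fun x => x) false)

-- ===== PRECONDITION & SPEC =====
-- Pre_ excludes exactly the inputs on which the Pythons raise KeyError (A and B raise at the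
-- same lookups): a traversed id missing from results, a traversed entry without "data", or a
-- supplied mode/detector filter value missing at its level (the key level is guarded by
-- 'key in …' / 'k in node' and never raises).
def Pre_get_result_ids (results : List (String × List (String × List (String × List (String × List (String × Bool)))))) (ids : List String) (modes : List String) (detectors : List String) (keys : List String) : Prop :=
  ∀ id_ ∈ (if ids.isEmpty then results.map Prod.fst else ids),
    pvHas results id_ = true ∧
    pvHas (pvGetD results id_ []) "data" = true ∧
    ∀ mode ∈ (if modes.isEmpty then (pvGetD (pvGetD results id_ []) "data" []).map Prod.fst else modes),
      pvHas (pvGetD (pvGetD results id_ []) "data" []) mode = true ∧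
      ∀ detector ∈ (if detectors.isEmpty then (pvGetD (pvGetD (pvGetD results id_ []) "data" []) mode []).map Prod.fst else detectors),
        pvHas (pvGetD (pvGetD (pvGetD results id_ []) "data" []) mode []) detector = true
instance (results : List (String × List (String × List (String × List (String × List (String × Bool)))))) (ids : List String) (modes : List String) (detectors : List String) (keys : List String) : Decidable (Pre_get_result_ids results ids modes detectors keys) := by unfold Pre_get_result_ids; infer_instance

def pvWitness_get_result_ids : (List (String × List (String × List (String × List (String × List (String × Bool)))))) × List String × List String × List String × List String :=
  ([("a", [("data", [("m", [("d", [("k", true), ("j", false)])])])])], [], [], [], [])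

def Spec_get_result_ids (results : List (String × List (String × List (String × List (String × List (String × Bool)))))) (ids : List String) (modes : List String) (detectors : List String) (keys : List String) (out : List String × List String × List String × List String) : Prop := out = get_result_ids_alt results ids modes detectors keys
instance (results : List (String × List (String × List (String × List (String × List (String × Bool)))))) (ids : List String) (modes : List String) (detectors : List String) (keys : List String) (out : List String × List String × List String × List String) : Decidable (Spec_get_result_ids results ids modes detectors keys out) := by unfold Spec_get_result_ids; infer_instance

-- ===== CLAIM (what is proved, stated in full; the proofs are below) =====
def Claim_equal_get_result_ids : Prop := ∀ (results : List (String × List (String × List (String × List (String × List (String × Bool)))))) (ids : List String) (modes : List String) (detectors : List String) (keys : List String), Dom_get_result_ids results ids modes detectors keys → Pre_get_result_ids results ids modes detectors keys → Spec_get_result_ids results ids modes detectors keys (get_result_ids results ids modes detectors keys)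

-- ===== LEMMAS AND PROOFS =====

-- a conditional pvStep4 loop is one fold of pvStep4 over the filtered, mapped hit list
theorem pv_foldl_if_step {β γ H : Type} (p : β → Bool) (t : β → H) (g : γ → H → γ)
    (L : List β) (st : γ) :
    L.foldl (fun st x => if p x then g st (t x) else st) st =
      List.foldl g st ((L.filter p).map t) := by
  induction L generalizing st with
  | nil => rfl
  | cons a l ih =>
    by_cases h : p a = true <;> simp [h, ih]

-- a loop of inner folds is one fold over the concatenation
theorem pv_foldl_step_flatMap {α β γ : Type} (f : α → List β) (L : List α)
    (g : γ → β → γ) (st : γ) :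
    L.foldl (fun st x => List.foldl g st (f x)) st = List.foldl g st (L.flatMap f) := by
  induction L generalizing st with
  | nil => rfl
  | cons a l ih => simp [ih, List.foldl_append]

-- folding pvStep4 componentwise is Set.update with the four projections
theorem pv_foldl_step4 (hits : List (String × String × String × String))
    (a b c d : PySem.Set String) :
    List.foldl pvStep4 (a, b, c, d) hits =
      (PySem.Set.update a (hits.map (·.1)), PySem.Set.update b (hits.map (·.2.1)),
       PySem.Set.update c (hits.map (·.2.2.1)), PySem.Set.update d (hits.map (·.2.2.2))) := by
  induction hits generalizing a b c d with
  | nil => simp [PySem.Set.update_nil]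
  | cons h t ih => simp [pvStep4, ih, PySem.Set.update_cons]

-- A's hit list: the traversal A performs, flattened
def pvHitsA (results : List (String × List (String × List (String × List (String × List (String × Bool))))))
    (ids modes detectors keys : List String) : List (String × String × String × String) :=
  (if ids.isEmpty then results.map (·.1) else ids).flatMap (fun id_ =>
    (if modes.isEmpty then (pvGetD (pvGetD results id_ []) "data" []).map (·.1) else modes).flatMap (fun mode =>
      (if detectors.isEmpty then (pvGetD (pvGetD (pvGetD results id_ []) "data" []) mode []).map (·.1) else detectors).flatMap (fun detector =>
        ((if keys.isEmpty then (pvGetD (pvGetD (pvGetD (pvGetD results id_ []) "data" []) mode []) detector []).map (·.1) else keys).filter (fun key =>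
            pvHas (pvGetD (pvGetD (pvGetD (pvGetD results id_ []) "data" []) mode []) detector []) key &&
            pvGetD (pvGetD (pvGetD (pvGetD (pvGetD results id_ []) "data" []) mode []) detector []) key false)).map
          (fun key => (id_, mode, detector, key)))))

-- B's tuple list is exactly A's hit list: consing the key at each level of the descent
-- builds the same quadruples the leaf-level map of A's traversal builds
theorem pv_tuples_eq (results : List (String × List (String × List (String × List (String × List (String × Bool))))))
    (ids modes detectors keys : List String) :
    (if ids.isEmpty then results.map (·.1) else ids).flatMap (fun i =>
      (pvRec3 (pvGetD (pvGetD results i []) "data" []) modes detectors keys).map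
        (fun t => (i, t))) = pvHitsA results ids modes detectors keys := by
  unfold pvHitsA pvRec3 pvRec2 pvRec1
  simp only [List.map_flatMap, List.map_map]
  rfl

-- the empty-tuples fallback coincides with the projections of the empty list
theorem pv_if_empty_proj (L : List (String × String × String × String)) :
    (if L.isEmpty then (([] : List String), ([] : List String), ([] : List String), ([] : List String))
     else
      (PySem.List.sorted (PySem.Set.ofList (L.map (·.1))) (fun x => x) false,
       PySem.List.sorted (PySem.Set.ofList (L.map (·.2.1))) (fun x => x) false,
       PySem.List.sorted (PySem.Set.ofList (L.map (·.2.2.1))) (fun x => x) false,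
       PySem.List.sorted (PySem.Set.ofList (L.map (·.2.2.2))) (fun x => x) false)) =
      (PySem.List.sorted (PySem.Set.ofList (L.map (·.1))) (fun x => x) false,
       PySem.List.sorted (PySem.Set.ofList (L.map (·.2.1))) (fun x => x) false,
       PySem.List.sorted (PySem.Set.ofList (L.map (·.2.2.1))) (fun x => x) false,
       PySem.List.sorted (PySem.Set.ofList (L.map (·.2.2.2))) (fun x => x) false) := by
  cases L <;> rfl

theorem get_result_ids_eq_alt (results : List (String × List (String × List (String × List (String × List (String × Bool))))))
    (ids modes detectors keys : List String) :
    get_result_ids results ids modes detectors keys =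
      get_result_ids_alt results ids modes detectors keys := by
  have hA : get_result_ids results ids modes detectors keys =
      (PySem.List.sorted (PySem.Set.ofList ((pvHitsA results ids modes detectors keys).map (·.1))) (fun x => x) false,
       PySem.List.sorted (PySem.Set.ofList ((pvHitsA results ids modes detectors keys).map (·.2.1))) (fun x => x) false,
       PySem.List.sorted (PySem.Set.ofList ((pvHitsA results ids modes detectors keys).map (·.2.2.1))) (fun x => x) false,
       PySem.List.sorted (PySem.Set.ofList ((pvHitsA results ids modes detectors keys).map (·.2.2.2))) (fun x => x) false) := by
    unfold get_result_ids pvHitsA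
    simp only [pv_foldl_if_step, pv_foldl_step_flatMap, pv_foldl_step4,
      PySem.Set.update_empty]
  rw [hA]
  unfold get_result_ids_alt
  simp only [pv_tuples_eq, pv_if_empty_proj]

-- ===== VERDICT (by name: the statement is the Claim_ definition above) =====
theorem get_result_ids_spec : Claim_equal_get_result_ids := by
  intro results ids modes detectors keys _ _
  unfold Spec_get_result_ids
  exact get_result_ids_eq_alt results ids modes detectors keys
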